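-- pv_equiv track=rewrite | github.com/zzi-0/zzi-ps-___- | programmers/level2/12902.py | solution
-- ===== SOURCE A (Python) =====
-- def solution(n):
--     dp = [0] * (n+1)
--     dp[2] = 3
--
--     for i in range(3,n+1):
--         if i % 2 == 0:
--             dp[i] += dp[i-2] * 3 + 2
--             for j in range(i-4,0,-2):
--                 dp[i] += dp[j] * 2
--     return dp[n] % 1000000007
-- ===== SOURCE B (Python) =====
-- def solution(n):
--     # Linear recurrence for 3xN domino tilings: f(2k) = 4*f(2k-2) - f(2k-4); odd widths have no tiling.
--     if n % 2 != 0: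
--         return 0
--     a, b = 1, 3
--     for _ in range(n // 2 - 1):
--         a, b = b, 4 * b - a
--     return b % 1000000007
-- ===== Notes on version B (the rewrite author's own statement) =====
-- stated objective: faster
-- what changed: Replaces the dp array with its quadratic inner prefix-sum loop by the two-term linear recurrence on even widths (next = 4*prev - prevprev), iterated with constant state.
import Mathlib
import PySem

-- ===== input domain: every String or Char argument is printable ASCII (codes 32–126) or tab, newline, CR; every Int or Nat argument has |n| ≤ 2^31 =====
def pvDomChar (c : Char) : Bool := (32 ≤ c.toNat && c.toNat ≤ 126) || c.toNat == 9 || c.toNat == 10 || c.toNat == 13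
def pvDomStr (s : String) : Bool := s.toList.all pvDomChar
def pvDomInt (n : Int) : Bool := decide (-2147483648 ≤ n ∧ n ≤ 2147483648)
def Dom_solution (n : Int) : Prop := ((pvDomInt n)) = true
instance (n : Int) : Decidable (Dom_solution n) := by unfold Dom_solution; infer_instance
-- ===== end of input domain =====

-- B replaces A's dp-array computation (quadratic inner prefix-sum loop) by the two-term
-- linear recurrence on even widths (next = 4*prev - prevprev) iterated with constant state.


-- ===== PORT A =====
-- inner loop: for j in range(i-4, 0, -2): dp[i] += dp[j] * 2
def aInner (i : Int) (dp : List Int) : List Int :=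
  (PySem.List.pyRange (i - 4) 0 (-2)).foldl
    (fun dp j => dp.set i.toNat (dp.getD i.toNat 0 + dp.getD j.toNat 0 * 2)) dp

-- one iteration of the outer loop body (indices are in range on every input Pre_ admits)
def aStep (dp : List Int) (i : Int) : List Int :=
  if PySem.Int.mod i 2 = 0 then
    aInner i (dp.set i.toNat (dp.getD i.toNat 0 + dp.getD (i - 2).toNat 0 * 3 + 2))
  else dp

def solution (n : Int) : Int :=
  let dp0 := (List.replicate (n + 1).toNat 0).set 2 3
  let dp := (PySem.List.pyRange 3 (n + 1) 1).foldl aStep dp0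
  PySem.Int.mod (dp.getD n.toNat 0) 1000000007

-- ===== PORT B =====
def bStep (p : Int × Int) (_ : Int) : Int × Int := (p.2, 4 * p.2 - p.1)

def solution_alt (n : Int) : Int :=
  if PySem.Int.mod n 2 ≠ 0 then 0
  else
    let ab := (PySem.List.pyRange 0 (PySem.Int.floordiv n 2 - 1) 1).foldl bStep (1, 3)
    PySem.Int.mod ab.2 1000000007

-- ===== PRECONDITION & SPEC =====
-- Python A raises IndexError (the assignment dp[2] = 3 on a list of length n+1 < 3) exactly when n ≤ 1.
def Pre_solution (n : Int) : Prop := 2 ≤ n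
instance (n : Int) : Decidable (Pre_solution n) := by unfold Pre_solution; infer_instance

def pvWitness_solution : Int := 6

def Spec_solution (n : Int) (out : Int) : Prop := out = solution_alt n
instance (n : Int) (out : Int) : Decidable (Spec_solution n out) := by unfold Spec_solution; infer_instance

-- ===== CLAIM (what is proved, stated in full; the proofs are below) =====
def Claim_equal_solution : Prop := ∀ (n : Int), Dom_solution n → Pre_solution n → Spec_solution n (solution n)

-- ===== LEMMAS AND PROOFS =====

-- the mathematical sequence: g k = number of domino tilings of a 3 x 2k board
def g : Nat → Int
  | 0 => 1
  | 1 => 3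
  | (k + 2) => 4 * g (k + 1) - g k

-- S m = g 1 + g 2 + … + g m
def S : Nat → Int
  | 0 => 0
  | (m + 1) => S m + g (m + 1)

lemma g_eq (m : Nat) : g (m + 2) = 3 * g (m + 1) + 2 + 2 * S m := by
  induction m with
  | zero => simp [g, S]
  | succ t ih =>
    have h3 : g (t + 3) = 4 * g (t + 2) - g (t + 1) := rfl
    rw [h3, ih]
    simp [S]
    ring

-- A's inner loop only ever writes index i, reading indices ≠ i: it adds 2 * (sum of the read cells)
lemma inner_fold (i : Nat) (dp : List Int) (L : List Int)
    (hL : ∀ j ∈ L, j.toNat ≠ i) (hi : i < dp.length) :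
    ∀ v : Int,
      L.foldl (fun dp j => dp.set i (dp.getD i 0 + dp.getD j.toNat 0 * 2)) (dp.set i v)
        = dp.set i (v + 2 * (L.map (fun j => dp.getD j.toNat 0)).sum) := by
  induction L with
  | nil => intro v; simp
  | cons j L ih =>
    intro v
    have hj := hL j (List.mem_cons_self)
    have h1 : (dp.set i v).getD i 0 = v := by
      rw [List.getD_eq_getElem?_getD, List.getElem?_set_self hi]; rfl
    have h2 : (dp.set i v).getD j.toNat 0 = dp.getD j.toNat 0 := by
      rw [List.getD_eq_getElem?_getD, List.getElem?_set_ne (Ne.symm hj), ← List.getD_eq_getElem?_getD]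
    simp only [List.foldl_cons, List.map_cons, List.sum_cons, h1, h2, List.set_set]
    rw [ih (fun x hx => hL x (List.mem_cons_of_mem _ hx))]
    congr 1
    ring

lemma sum_range_g (r : Nat) :
    ((List.range r).map (fun k => g (r - k))).sum = S r := by
  induction r with
  | zero => simp [S]
  | succ r ih =>
    rw [List.range_succ_eq_map]
    simp only [List.map_cons, List.map_map, List.sum_cons]
    have hmap : (List.range r).map ((fun k => g (r + 1 - k)) ∘ Nat.succ) = (List.range r).map (fun k => g (r - k)) := by
      apply List.map_congr_left
      intro k _
      simp [Nat.succ_sub_succ]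
    rw [hmap, ih]
    simp [S]; ring

-- range(2m, 0, -2) = [2m, 2m-2, …, 2]
lemma pyRange_neg_two (m : Nat) :
    PySem.List.pyRange (2 * (m : Int)) 0 (-2) = (List.range m).map (fun k : Nat => 2 * (m : Int) - 2 * (k : Int)) := by
  rcases Nat.eq_zero_or_pos m with h | h
  · subst h; simp [PySem.List.pyRange]
  · simp only [PySem.List.pyRange]
    rw [if_neg (by norm_num), if_neg (by norm_num), if_pos (by omega : (0:Int) < 2 * m)]
    have he : (2 * (m:Int) - 0 + - -2 - 1) = 2 * m + 1 := by ring
    have hc : ((2 * (m:Int) + 1) / - -2).toNat = m := by norm_num; omega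
    rw [he, hc]
    apply List.map_congr_left
    intro k _
    ring

-- expected dp entry after the outer loop has processed i = 3 .. 2*m
def expect (m k : Nat) : Int :=
  if k % 2 = 0 ∧ 2 ≤ k ∧ k ≤ 2 * m then g (k / 2) else 0

def InvA (N m : Nat) (dp : List Int) : Prop :=
  dp.length = N ∧ ∀ k : Nat, dp.getD k 0 = expect m k

lemma aStep_odd (dp : List Int) (i : Int) (h : i % 2 = 1) : aStep dp i = dp := by
  unfold aStep
  rw [PySem.Int.mod_eq_emod_of_pos (by norm_num), if_neg (by omega)]

lemma aStep_even (N m : Nat) (dp : List Int) (hm : 1 ≤ m) (hN : 2 * m + 2 < N)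
    (h : InvA N m dp) : InvA N (m + 1) (aStep dp (2 * (m : Int) + 2)) := by
  obtain ⟨hlen, hget⟩ := h
  have hmod : PySem.Int.mod (2 * (m : Int) + 2) 2 = 0 := by
    rw [PySem.Int.mod_eq_emod_of_pos (by norm_num)]; omega
  have hti : ((2 * (m : Int) + 2)).toNat = 2 * m + 2 := by omega
  have ht2 : ((2 * (m : Int) + 2) - 2).toNat = 2 * m := by omega
  have hv1 : dp.getD (2 * m + 2) 0 = 0 := by
    rw [hget]; simp only [expect]; rw [if_neg (by omega)]
  have hv2 : dp.getD (2 * m) 0 = g m := by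
    rw [hget]; simp only [expect]; rw [if_pos (by omega)]
    congr 1; omega
  unfold aStep aInner
  rw [if_pos hmod, hti, ht2, hv1, hv2]
  have hrange : (2 * (m : Int) + 2) - 4 = 2 * ((m - 1 : Nat) : Int) := by omega
  rw [hrange, pyRange_neg_two]
  rw [inner_fold (2 * m + 2) dp _ (by
        intro j hj
        simp only [List.mem_map, List.mem_range] at hj
        obtain ⟨k, hk, rfl⟩ := hj
        omega)
      (by omega)]
  have hsum : ((List.range (m-1)).map (fun k : Nat => 2 * ((m-1 : Nat) : Int) - 2 * (k : Int))).map (fun j => dp.getD j.toNat 0)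
      = (List.range (m-1)).map (fun k => g ((m-1) - k)) := by
    rw [List.map_map]
    apply List.map_congr_left
    intro k hk
    simp only [List.mem_range] at hk
    simp only [Function.comp]
    rw [hget]
    simp only [expect]
    rw [if_pos (by constructor <;> omega)]
    congr 1
    omega
  rw [hsum, sum_range_g]
  have hval : 0 + g m * 3 + 2 + 2 * S (m - 1) = g (m + 1) := by
    obtain ⟨t, rfl⟩ : ∃ t, m = t + 1 := ⟨m - 1, by omega⟩
    have h1 : t + 1 - 1 = t := rfl
    have h2 : t + 1 + 1 = t + 2 := rfl
    rw [h1, h2, g_eq t]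
    ring
  rw [hval]
  constructor
  · simpa using hlen
  · intro k
    rcases eq_or_ne k (2 * m + 2) with rfl | hk
    · rw [List.getD_eq_getElem?_getD, List.getElem?_set_self (by omega)]
      simp only [expect, Option.getD_some]
      rw [if_pos (by omega)]
      congr 1; omega
    · rw [List.getD_eq_getElem?_getD, List.getElem?_set_ne (by omega), ← List.getD_eq_getElem?_getD, hget]
      simp only [expect]
      split_ifs with h1 h2 h2 <;> first | rfl | (exfalso; omega)

lemma dpAfter_inv (m : Nat) (hm : 1 ≤ m) : ∀ N : Nat, 2 * m < N →
    InvA N m ((PySem.List.pyRange 3 (2 * (m : Int) + 1) 1).foldl aStep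
      ((List.replicate N 0).set 2 3)) := by
  induction m, hm using Nat.le_induction with
  | base =>
    intro N hN
    have h3 : (2 * ((1:Nat) : Int) + 1) = 3 := by norm_num
    rw [h3, PySem.List.pyRange_one_eq_nil le_rfl]
    simp only [List.foldl_nil]
    refine ⟨by simp, fun k => ?_⟩
    rcases eq_or_ne k 2 with rfl | hk
    · rw [List.getD_eq_getElem?_getD, List.getElem?_set_self (by simp; omega)]
      simp [expect, g]
    · rw [List.getD_eq_getElem?_getD, List.getElem?_set_ne (Ne.symm hk), ← List.getD_eq_getElem?_getD]
      simp only [expect]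
      rw [if_neg (by omega)]
      rcases Nat.lt_or_ge k N with h | h
      · exact List.getD_replicate 0 h
      · rw [List.getD_eq_getElem?_getD, List.getElem?_eq_none (by simpa using h)]; rfl
  | succ m hm ih =>
    intro N hN
    have hsplit : PySem.List.pyRange 3 (2 * ((m+1 : Nat) : Int) + 1) 1
        = PySem.List.pyRange 3 (2 * (m : Int) + 1) 1 ++ [2 * (m : Int) + 1, 2 * (m : Int) + 2] := by
      have e1 : (2 * ((m+1 : Nat) : Int) + 1) = (2 * (m : Int) + 2) + 1 := by push_cast; ring
      have e2 : (2 * (m : Int) + 2) = (2 * (m : Int) + 1) + 1 := by ring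
      rw [e1, PySem.List.pyRange_one_succ_right (by omega), e2,
          PySem.List.pyRange_one_succ_right (by omega), List.append_assoc]
      norm_num
    rw [hsplit, List.foldl_append]
    simp only [List.foldl_cons, List.foldl_nil]
    rw [aStep_odd _ (2 * (m : Int) + 1) (by omega)]
    exact aStep_even N m _ hm (by omega) (ih N (by omega))

lemma bFold (k : Nat) :
    (PySem.List.pyRange 0 (k : Int) 1).foldl bStep (1, 3) = (g k, g (k + 1)) := by
  induction k with
  | zero => simp [PySem.List.pyRange_one_eq_nil, g]
  | succ k ih =>
    have e : ((k+1 : Nat) : Int) = (k : Int) + 1 := by push_cast; ring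
    rw [e, PySem.List.pyRange_one_succ_right (by omega), List.foldl_append, ih]
    simp only [List.foldl_cons, List.foldl_nil, bStep]
    rfl

lemma final (n : Int) (hn : 2 ≤ n) : solution n = solution_alt n := by
  rcases Int.even_or_odd n with ⟨q0, hq0⟩ | ⟨q0, hq0⟩
  · obtain ⟨q, rfl⟩ : ∃ q : Nat, n = 2 * (q : Int) := ⟨q0.toNat, by omega⟩
    have hq : 1 ≤ q := by omega
    simp only [solution, solution_alt]
    have hN : (2 * (q:Int) + 1).toNat = 2*q+1 := by omega
    rw [hN]
    obtain ⟨hlen, hget⟩ := dpAfter_inv q hq (2*q+1) (by omega)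
    have hidx : (2*(q:Int)).toNat = 2*q := by omega
    rw [hidx, hget]
    have hex : expect q (2*q) = g q := by
      simp only [expect]; rw [if_pos (by omega)]; congr 1; omega
    rw [hex]
    have hmod : PySem.Int.mod (2*(q:Int)) 2 = 0 := by
      rw [PySem.Int.mod_eq_emod_of_pos (by norm_num)]; omega
    rw [hmod]
    simp only [ne_eq, not_true_eq_false, if_false]
    rw [PySem.Int.floordiv_eq_ediv_of_pos (by norm_num)]
    have hdiv : (2*(q:Int))/2 = ((q - 1 : Nat) : Int) + 1 := by omega
    rw [hdiv]
    have e : ((q - 1 : Nat) : Int) + 1 - 1 = ((q - 1 : Nat) : Int) := by ring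
    rw [e, bFold (q-1)]
    have e2 : q - 1 + 1 = q := by omega
    rw [e2]
  · obtain ⟨q, rfl⟩ : ∃ q : Nat, n = 2 * (q : Int) + 1 := ⟨q0.toNat, by omega⟩
    have hq : 1 ≤ q := by omega
    simp only [solution, solution_alt]
    have hmod : PySem.Int.mod (2*(q:Int)+1) 2 = 1 := by
      rw [PySem.Int.mod_eq_emod_of_pos (by norm_num)]; omega
    rw [hmod]
    simp only [ne_eq, one_ne_zero, not_false_eq_true, if_true]
    rw [PySem.List.pyRange_one_succ_right (by omega : (3:Int) ≤ 2*(q:Int)+1)]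
    rw [List.foldl_append]
    simp only [List.foldl_cons, List.foldl_nil]
    rw [aStep_odd _ (2*(q:Int)+1) (by omega)]
    have hN : (2*(q:Int)+1+1).toNat = 2*q+2 := by omega
    rw [hN]
    obtain ⟨hlen, hget⟩ := dpAfter_inv q hq (2*q+2) (by omega)
    have hidx : (2*(q:Int)+1).toNat = 2*q+1 := by omega
    rw [hidx, hget]
    have hex : expect q (2*q+1) = 0 := by simp only [expect]; rw [if_neg (by omega)]
    rw [hex]
    decide

-- ===== VERDICT (by name: the statement is the Claim_ definition above) =====
theorem solution_spec : Claim_equal_solution := by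
  intro n _ hpre
  unfold Spec_solution
  exact final n hpre
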